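-- pv_equiv track=rewrite | github.com/hurstdog/adventofcode | 2025/day3/algorithm_options.py | sliding_window_greedy
-- ===== SOURCE A (Python) =====
-- def sliding_window_greedy(line, target_length=12):
--     """
--     VARIATION: Sliding window approach - at each position, decide whether to keep
--     the current digit based on what's ahead.
--
--     Similar to greedy but uses a different perspective:
--     - For each position, check if removing current digit allows keeping
--       a larger digit later
--     - Time: O(n^2) in worst case
--     - Space: O(n)
--     """
--     to_remove = len(line) - target_length
--     result = []
--     i = 0
--
--     while i < len(line) and to_remove > 0:
--         # Look ahead to see if there's a larger digit we could get by removing current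
--         # Find the maximum digit in the next (to_remove + 1) positions
--         lookahead_end = min(i + to_remove + 1, len(line))
--         max_digit = max(line[i:lookahead_end])
--         max_pos = line[i:lookahead_end].index(max_digit) + i
--
--         if line[i] < max_digit:
--             # Skip digits until we reach the max
--             to_remove -= (max_pos - i)
--             i = max_pos
--         else:
--             result.append(line[i])
--             i += 1
--
--     # Add remaining digits if we haven't reached target_length
--     while i < len(line) and len(result) < target_length:
--         result.append(line[i])
--         i += 1
--
--     # Remove from end if we have too many
--     while len(result) > target_length:
--         result.pop()
--
--     return ''.join(result)
-- ===== SOURCE B (Python) =====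
-- def sliding_window_greedy(line, target_length=12):
--     """Monotonic-stack re-implementation: one left-to-right pass removing
--     up to len(line)-target_length characters that have a larger character
--     after them, then truncate to target_length."""
--     to_remove = len(line) - target_length
--     stack = []
--     for c in line:
--         while stack and to_remove > 0 and stack[-1] < c:
--             stack.pop()
--             to_remove -= 1
--         stack.append(c)
--     return ''.join(stack[:target_length])
-- ===== Notes on version B (the rewrite author's own statement) =====
-- stated objective: faster
-- what changed: Replaced A's quadratic look-ahead loop (recomputing max and index over an up-to-(to_remove+1)-wide window at each position, plus two clean-up loops) by the standard one-pass monotonic-stack greedy that pops at most len(line)-target_length smaller characters overall and then truncates the stack.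
-- outside the precondition, e.g. on sliding_window_greedy('123', -1): A raises IndexError, B returns ''
import Mathlib
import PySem

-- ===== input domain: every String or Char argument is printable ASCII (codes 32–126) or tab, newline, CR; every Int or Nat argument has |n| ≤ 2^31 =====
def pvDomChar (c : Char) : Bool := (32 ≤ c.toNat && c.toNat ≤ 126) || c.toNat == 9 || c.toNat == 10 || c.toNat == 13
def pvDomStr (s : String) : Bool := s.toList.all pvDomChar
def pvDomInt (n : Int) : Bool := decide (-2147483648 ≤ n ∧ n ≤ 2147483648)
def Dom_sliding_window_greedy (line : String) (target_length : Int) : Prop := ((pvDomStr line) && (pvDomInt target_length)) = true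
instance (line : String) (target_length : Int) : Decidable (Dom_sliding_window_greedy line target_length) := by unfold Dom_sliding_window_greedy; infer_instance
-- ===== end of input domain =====

-- B replaces A's quadratic look-ahead/jump loop by a one-pass monotonic-stack sweep (objective: faster).

-- ===== PORT A =====
-- first while loop of A: state (result, i, to_remove); fuel bounds the iteration count
-- (line.length + 1 steps suffice from the initial state i = 0, proved in the lemmas below);
-- the `none` match arms are unreachable for the states the function is actually run on
-- (window nonempty, max_digit ∈ window, 0 ≤ i < len).
def pvAloop (s : List Char) : List Char → Int → Int → Nat → (List Char × Int)
  | result, i, _, 0 => (result, i)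
  | result, i, to_remove, fuel+1 =>
    if i < (s.length : Int) ∧ to_remove > 0 then
      let lookahead_end : Int := min (i + to_remove + 1) (s.length : Int)
      let window := PySem.List.slice s (some i) (some lookahead_end)
      match PySem.List.max? window (fun y => y) with
      | none => (result, i)
      | some max_digit =>
        match PySem.List.index? window max_digit with
        | none => (result, i)
        | some idx =>
          let max_pos : Int := (idx : Int) + i
          match PySem.List.pyGet? s i with
          | none => (result, i)
          | some ci =>
            if ci < max_digit then pvAloop s result max_pos (to_remove - (max_pos - i)) fuel
            else pvAloop s (result ++ [ci]) (i+1) to_remove fuel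
    else (result, i)

-- second while loop of A: append remaining chars while the result is shorter than target_length
def pvAphase2 (s : List Char) (result : List Char) (i target : Int) : List Char :=
  if h : i < (s.length : Int) ∧ (result.length : Int) < target then
    match PySem.List.pyGet? s i with
    | none => result
    | some c => pvAphase2 s (result ++ [c]) (i+1) target
  else result
termination_by ((s.length : Int) - i).toNat
decreasing_by omega

-- third while loop of A: result.pop() while too long (pop on [] = Python IndexError, outside Pre_)
def pvAphase3 (result : List Char) (target : Int) : List Char :=
  if h : (result.length : Int) > target then
    match hp : PySem.List.pop? result (-1) with
    | none => result
    | some (_, rest) => pvAphase3 rest target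
  else result
termination_by result.length
decreasing_by have := PySem.List.length_of_pop?_eq_some result hp; simp at this ⊢; omega

def sliding_window_greedy (line : String) (target_length : Int) : String :=
  let s := line.toList
  let to_remove : Int := (s.length : Int) - target_length
  let p := pvAloop s [] 0 to_remove (s.length + 1)
  String.mk (pvAphase3 (pvAphase2 s p.1 p.2 target_length) target_length)

-- ===== PORT B =====
-- inner while loop of B: pop the top of the stack while it is smaller than c and budget remains
def pvBpops (stack : List Char) (rem : Int) (c : Char) : List Char × Int :=
  match hs : stack.getLast? with
  | none => (stack, rem)
  | some top =>
    if rem > 0 ∧ top < c then pvBpops stack.dropLast (rem - 1) c else (stack, rem)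
termination_by stack.length
decreasing_by
  have : stack ≠ [] := by intro h; rw [h] at hs; simp at hs
  simp [List.length_dropLast]; cases stack <;> simp_all

def pvBstep (st : List Char × Int) (c : Char) : List Char × Int :=
  let p := pvBpops st.1 st.2 c
  (p.1 ++ [c], p.2)

def sliding_window_greedy_alt (line : String) (target_length : Int) : String :=
  let to_remove : Int := (line.toList.length : Int) - target_length
  let p := line.toList.foldl pvBstep ([], to_remove)
  String.mk (PySem.List.slice p.1 none (some target_length))

-- ===== PRECONDITION & SPEC =====
-- Pre_ excludes target_length < 0, where A's final while loop pops from an empty list and raises IndexError.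
def Pre_sliding_window_greedy (line : String) (target_length : Int) : Prop := 0 ≤ target_length
instance (line : String) (target_length : Int) : Decidable (Pre_sliding_window_greedy line target_length) := by unfold Pre_sliding_window_greedy; infer_instance

def pvWitness_sliding_window_greedy : String × Int := ("2169320", 3)

def Spec_sliding_window_greedy (line : String) (target_length : Int) (out : String) : Prop := out = sliding_window_greedy_alt line target_length
instance (line : String) (target_length : Int) (out : String) : Decidable (Spec_sliding_window_greedy line target_length out) := by unfold Spec_sliding_window_greedy; infer_instance

-- ===== CLAIM (what is proved, stated in full; the proofs are below) =====
def Claim_equal_sliding_window_greedy : Prop := ∀ (line : String) (target_length : Int), Dom_sliding_window_greedy line target_length → Pre_sliding_window_greedy line target_length → Spec_sliding_window_greedy line target_length (sliding_window_greedy line target_length)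

-- ===== LEMMAS AND PROOFS =====

-- proof-side model of B's stack loop: stack top at the HEAD, Nat budget
def pvPops : List Char → Nat → Char → List Char × Nat
  | [], r, _ => ([], r)
  | t :: st, r, c => if 0 < r ∧ t < c then pvPops st (r-1) c else (t :: st, r)

def pvRun : List Char → Nat → List Char → List Char × Nat
  | st, r, [] => (st, r)
  | st, r, c :: cs => pvRun (c :: (pvPops st r c).1) (pvPops st r c).2 cs

-- proof-side model of A's first loop, on the suffix: jump to the first maximum of the
-- (r+1)-window, or keep the head; returns kept prefix ++ untouched suffix
def pvF (s : List Char) (r : Nat) : List Char :=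
  if r = 0 then s else
  match s with
  | [] => []
  | a :: t =>
    let w := (a :: t).take (r+1)
    match PySem.List.max? w (fun y => y) with
    | none => []
    | some m =>
      match PySem.List.index? w m with
      | none => []
      | some j => if j = 0 then a :: pvF t r else pvF ((a :: t).drop j) (r - j)
termination_by s.length
decreasing_by
  · simp
  · rename_i hj; simp; omega

theorem pvPops_spec (st : List Char) (r : Nat) (c : Char) :
    ∃ k, k ≤ st.length ∧ k ≤ r ∧ pvPops st r c = (st.drop k, r - k) := by
  induction st generalizing r with
  | nil => exact ⟨0, by simp [pvPops]⟩
  | cons t st ih =>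
    by_cases h : 0 < r ∧ t < c
    · obtain ⟨k, hk1, hk2, hk3⟩ := ih (r-1)
      exact ⟨k+1, by simpa using hk1, by omega, by
        simp [pvPops, h, hk3]; omega⟩
    · exact ⟨0, by simp [pvPops, h]⟩

theorem pvPops_rem_le (st : List Char) (r : Nat) (c : Char) : (pvPops st r c).2 ≤ r := by
  obtain ⟨k, _, hk2, hk3⟩ := pvPops_spec st r c
  rw [hk3]; show r - k ≤ r; omega

theorem pvPops_concat (st : List Char) (r : Nat) (c b : Char)
    (h : r ≤ st.length ∨ ¬ b < c) :
    pvPops (st ++ [b]) r c = ((pvPops st r c).1 ++ [b], (pvPops st r c).2) := by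
  induction st generalizing r with
  | nil =>
    have : ¬ (0 < r ∧ b < c) := by
      rcases h with h | h
      · simp at h; omega
      · tauto
    simp [pvPops, this]
  | cons t st ih =>
    by_cases hc : 0 < r ∧ t < c
    · simp only [List.cons_append, pvPops, hc, if_pos, and_self]
      rw [ih (r-1)]
      rcases h with h | h
      · left; simp at h ⊢; omega
      · right; exact h
    · simp [pvPops, hc]

theorem pvPops_all (st : List Char) (r : Nat) (c : Char)
    (h : ∀ x ∈ st, x < c) (hr : st.length ≤ r) :
    pvPops st r c = ([], r - st.length) := by
  induction st generalizing r with
  | nil => simp [pvPops]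
  | cons t st ih =>
    have h1 : 0 < r ∧ t < c := ⟨by simp at hr; omega, h t (by simp)⟩
    simp only [pvPops, h1, and_self, if_pos]
    rw [ih (r-1) (fun x hx => h x (by simp [hx])) (by simp at hr; omega)]
    simp at hr ⊢; omega

theorem pvRun_zero (cs st : List Char) : pvRun st 0 cs = (cs.reverse ++ st, 0) := by
  induction cs generalizing st with
  | nil => simp [pvRun]
  | cons c cs ih =>
    have hp : pvPops st 0 c = (st, 0) := by cases st <;> simp [pvPops]
    simp [pvRun, hp, ih]

theorem pvTake_mono {α : Type} (l : List α) {a a' : Nat} (h : a ≤ a') : l.take a ⊆ l.take a' := by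
  intro x hx
  have he : l.take a = (l.take a').take a := by rw [List.take_take, Nat.min_eq_left h]
  rw [he] at hx; exact List.take_subset _ _ hx

theorem pvRun_concat (cs : List Char) (st : List Char) (b : Char) (r : Nat)
    (h : ∀ x ∈ cs.take (r - st.length), x ≤ b) :
    pvRun (st ++ [b]) r cs = ((pvRun st r cs).1 ++ [b], (pvRun st r cs).2) := by
  induction cs generalizing st r with
  | nil => simp [pvRun]
  | cons c cs ih =>
    have hcb : r ≤ st.length ∨ ¬ b < c := by
      by_cases hle : r ≤ st.length
      · exact Or.inl hle
      · refine Or.inr ?_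
        have hc : c ∈ (c :: cs).take (r - st.length) := by
          obtain ⟨m, hm⟩ : ∃ m, r - st.length = m + 1 := ⟨r - st.length - 1, by omega⟩
          rw [hm, List.take_succ_cons]; simp
        exact not_lt.mpr (h c hc)
    obtain ⟨k, hk1, hk2, hk3⟩ := pvPops_spec st r c
    have hnext : ∀ x ∈ cs.take ((pvPops st r c).2 - (c :: (pvPops st r c).1).length), x ≤ b := by
      intro x hx
      rw [hk3] at hx
      simp only [List.length_cons, List.length_drop] at hx
      by_cases h0 : r ≤ st.length
      · have hz : (r - k) - (st.length - k + 1) = 0 := by omega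
        rw [hz] at hx; simp at hx
      · apply h
        obtain ⟨m, hm⟩ : ∃ m, r - st.length = m + 1 := ⟨r - st.length - 1, by omega⟩
        rw [hm, List.take_succ_cons]
        exact List.mem_cons_of_mem _ (pvTake_mono cs (by omega) hx)
    simp only [pvRun, pvPops_concat st r c b hcb]
    rw [show (c :: ((pvPops st r c).1 ++ [b])) = (c :: (pvPops st r c).1) ++ [b] from by simp]
    exact ih _ _ hnext

theorem pvRun_skip (pre : List Char) (st : List Char) (r : Nat) (c : Char) (rest : List Char)
    (hst : ∀ x ∈ st, x < c) (hpre : ∀ x ∈ pre, x < c)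
    (hr : st.length + pre.length ≤ r) :
    pvRun st r (pre ++ c :: rest) = pvRun [c] (r - st.length - pre.length) rest := by
  induction pre generalizing st r with
  | nil =>
    simp only [List.nil_append, pvRun]
    rw [pvPops_all st r c hst (by simpa using hr)]
    simp
  | cons p pre ih =>
    simp only [List.cons_append, pvRun]
    obtain ⟨k, hk1, hk2, hk3⟩ := pvPops_spec st r p
    rw [hk3]
    rw [ih (p :: st.drop k) (r - k)
      (fun x hx => by
        rcases List.mem_cons.mp hx with h | h
        · subst h; exact hpre x (by simp)
        · exact hst x (List.drop_subset _ _ h))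
      (fun x hx => hpre x (by simp [hx]))
      (by simp at hr ⊢; omega)]
    congr 1
    simp at hr ⊢; omega

theorem pvRun_main (n : Nat) (s : List Char) (r : Nat) (hn : s.length ≤ n) :
    (pvRun [] r s).1 = (pvF s r).reverse := by
  induction n generalizing s r with
  | zero =>
    have : s = [] := by cases s <;> simp_all
    subst this
    cases hr : r <;> simp [pvRun, pvF.eq_def]
  | succ n ih =>
    by_cases hr0 : r = 0
    · subst hr0; rw [pvRun_zero]; simp [pvF.eq_def]
    cases s with
    | nil => simp [pvRun, pvF.eq_def, hr0]
    | cons a t =>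
      have hw : (a :: t).take (r+1) = a :: t.take r := by rw [List.take_succ_cons]
      cases hm : PySem.List.max? ((a :: t).take (r+1)) (fun y => y) with
      | none => rw [PySem.List.max?_eq_none_iff] at hm; simp [hw] at hm
      | some m =>
        have hmem : m ∈ (a :: t).take (r+1) := PySem.List.max?_mem hm
        have hmax : ∀ y ∈ (a :: t).take (r+1), y ≤ m := PySem.List.max?_isMax hm
        cases hidx : PySem.List.index? ((a :: t).take (r+1)) m with
        | none =>
          have := (PySem.List.index?_isSome_iff ((a :: t).take (r+1)) m).mpr hmem
          rw [hidx] at this; simp at this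
        | some j =>
          rw [PySem.List.index?_eq_some_iff] at hidx
          obtain ⟨pre, suf, hweq, hlen, hnm⟩ := hidx
          by_cases hj0 : j = 0
          · -- keep the head: a is the window maximum
            subst hj0
            have hpre : pre = [] := List.eq_nil_of_length_eq_zero hlen
            subst hpre
            have ham : a = m := by
              rw [hw] at hweq; simpa using congrArg (fun l => l.headI) hweq
            have hstep : pvRun [] r (a :: t) = pvRun ([] ++ [a]) r t := by
              simp [pvRun, pvPops]
            rw [hstep, pvRun_concat t [] a r (fun x hx => by
              refine (ham ▸ hmax x ?_)
              rw [hw]; simp at hx ⊢; exact Or.inr (pvTake_mono t (by omega) hx))]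
            rw [pvF.eq_def]
            simp only [if_neg hr0]
            have hFm : PySem.List.max? ((a :: t).take (r+1)) (fun y => y) = some m := hm
            simp only [hFm]
            rw [PySem.List.index?_eq_some_iff ((a :: t).take (r+1)) m 0 |>.mpr ⟨[], suf, hweq, rfl, by simp⟩]
            simp [ih t r (by simp at hn; omega)]
          · -- jump to the window maximum at position j ≥ 1
            have hjle : j ≤ r := by
              have : pre.length < ((a :: t).take (r+1)).length := by rw [hweq]; simp
              have hwl : ((a :: t).take (r+1)).length ≤ r + 1 := by simp
              omega
            have hs : a :: t = pre ++ m :: (suf ++ (a :: t).drop (r+1)) := by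
              conv_lhs => rw [← List.take_append_drop (r+1) (a :: t)]
              rw [hweq]; simp
            have hprelt : ∀ x ∈ pre, x < m := by
              intro x hx
              have hle : x ≤ m := hmax x (by rw [hweq]; exact List.mem_append_left _ hx)
              have hne : x ≠ m := fun he => hnm (he ▸ hx)
              exact lt_of_le_of_ne hle hne
            have hdrop : (a :: t).drop j = m :: (suf ++ (a :: t).drop (r+1)) := by
              conv_lhs => rw [hs]
              rw [← hlen, List.drop_left]
            have hlhs : pvRun [] r (a :: t) = pvRun [] (r - j) ((a :: t).drop j) := by
              conv_lhs => rw [hs]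
              rw [pvRun_skip pre [] r m _ (by simp) hprelt (by simp [hlen]; omega)]
              rw [hdrop]
              simp [pvRun, pvPops, hlen]
            rw [hlhs, ih _ (r - j) (by
              have : j ≠ 0 := hj0
              simp at hn ⊢; omega)]
            congr 1
            conv_rhs => rw [pvF.eq_def]
            simp only [if_neg hr0, hm]
            rw [PySem.List.index?_eq_some_iff ((a :: t).take (r+1)) m j |>.mpr ⟨pre, suf, hweq, hlen, hnm⟩]
            simp only [if_neg hj0]

theorem pvF_step (a : Char) (t : List Char) (r : Nat) (hr : r ≠ 0) (m : Char) (j : Nat)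
    (hm : PySem.List.max? ((a :: t).take (r+1)) (fun y => y) = some m)
    (hj : PySem.List.index? ((a :: t).take (r+1)) m = some j) :
    pvF (a :: t) r = if j = 0 then a :: pvF t r else pvF ((a :: t).drop j) (r - j) := by
  rw [pvF.eq_def]; simp only [if_neg hr, hm, hj]

-- the head of the window is strictly below the maximum iff the first maximum is not at index 0
theorem pvIdx_head_lt (a : Char) (t : List Char) (r : Nat) (m : Char) (j : Nat)
    (hm : PySem.List.max? ((a :: t).take (r+1)) (fun y => y) = some m)
    (hj : PySem.List.index? ((a :: t).take (r+1)) m = some j) :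
    (a < m ↔ j ≠ 0) := by
  have hmax : ∀ y ∈ (a :: t).take (r+1), y ≤ m := PySem.List.max?_isMax hm
  obtain ⟨pre, suf, hweq, hlen, hnm⟩ := (PySem.List.index?_eq_some_iff _ _ _).mp hj
  have hwcons : (a :: t).take (r+1) = a :: t.take r := List.take_succ_cons
  constructor
  · intro hlt hj0
    subst hj0
    have hpre : pre = [] := List.eq_nil_of_length_eq_zero hlen
    subst hpre
    have : a = m := by rw [hwcons] at hweq; simpa using congrArg (fun l => l.headI) hweq
    subst this; exact lt_irrefl _ hlt
  · intro hj0
    have hane : a ∈ pre := by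
      have : pre ≠ [] := by intro h; subst h; simp at hlen; omega
      obtain ⟨p0, pre', rfl⟩ := List.exists_cons_of_ne_nil this
      have : a = p0 := by rw [hwcons] at hweq; simpa using congrArg (fun l => l.headI) hweq
      simp [this]
    have hle : a ≤ m := hmax a (by rw [hwcons]; simp)
    have hne : a ≠ m := fun he => hnm (he ▸ hane)
    exact lt_of_le_of_ne hle hne

-- A's first loop computes pvF
theorem pvAloop_F (s : List Char) (fuel i r : Nat) (acc : List Char)
    (hi : i ≤ s.length) (hf : s.length - i < fuel) :
    ∃ (res : List Char) (i' : Nat),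
      pvAloop s acc (i : Int) (r : Int) fuel = (res, (i' : Int)) ∧ i' ≤ s.length ∧
      res ++ s.drop i' = acc ++ pvF (s.drop i) r := by
  induction fuel generalizing i r acc with
  | zero => omega
  | succ fuel ih =>
    by_cases hc : i < s.length ∧ 0 < r
    · have hds : s.drop i = s[i] :: s.drop (i+1) := List.drop_eq_getElem_cons hc.1
      have hr0 : r ≠ 0 := by omega
      have hle0 : (0:Int) ≤ min ((i:Int) + (r:Int) + 1) (s.length:Int) := by omega
      have hslice : PySem.List.slice s (some (i:Int)) (some (min ((i:Int) + (r:Int) + 1) (s.length:Int)))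
          = (s.drop i).take (r+1) := by
        rw [PySem.List.slice_toNat s (by omega) hle0]
        have h2 : ((i:Int)).toNat = i := by omega
        have h1 : ((min ((i:Int) + (r:Int) + 1) (s.length:Int)).toNat)
            = min (i+r+1) s.length := by omega
        rw [h1, h2]
        have h3 : min (i+r+1) s.length - i = min (r+1) (s.length - i) := by omega
        rw [h3, show s.length - i = (List.drop i s).length from by simp]
        rw [← List.take_take, List.take_length]
      have hwne : (s.drop i).take (r+1) ≠ [] := by
        rw [hds, List.take_succ_cons]; exact List.cons_ne_nil _ _
      cases hm : PySem.List.max? ((s.drop i).take (r+1)) (fun y => y) with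
      | none => exact absurd ((PySem.List.max?_eq_none_iff _ _).mp hm) hwne
      | some m =>
        cases hidx : PySem.List.index? ((s.drop i).take (r+1)) m with
        | none =>
          have := (PySem.List.index?_isSome_iff ((s.drop i).take (r+1)) m).mpr (PySem.List.max?_mem hm)
          rw [hidx] at this; simp at this
        | some j =>
          have hm' : PySem.List.max? ((s[i] :: s.drop (i+1)).take (r+1)) (fun y => y) = some m := by
            rw [← hds]; exact hm
          have hidx' : PySem.List.index? ((s[i] :: s.drop (i+1)).take (r+1)) m = some j := by
            rw [← hds]; exact hidx
          have hjlt : j < ((s.drop i).take (r+1)).length := by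
            obtain ⟨pre, suf, hweq, hlen, _⟩ := (PySem.List.index?_eq_some_iff _ _ _).mp hidx
            rw [hweq]; simp [← hlen]
          have hjr : j ≤ r := by simp at hjlt; omega
          have hij : i + j ≤ s.length := by simp at hjlt; omega
          have hget : PySem.List.pyGet? s (i:Int) = some s[i] := PySem.List.pyGet?_ofNat s i hc.1
          have hlt := pvIdx_head_lt s[i] (s.drop (i+1)) r m j hm' hidx'
          have hstep : pvAloop s acc (i:Int) (r:Int) (fuel+1)
              = if s[i] < m then pvAloop s acc ((j:Int) + (i:Int)) ((r:Int) - (((j:Int) + (i:Int)) - (i:Int))) fuel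
                else pvAloop s (acc ++ [s[i]]) ((i:Int)+1) (r:Int) fuel := by
            rw [pvAloop]
            rw [if_pos (show ((i:Int) < (s.length:Int) ∧ ((r:Int) > 0)) from
              ⟨by omega, by omega⟩)]
            simp only [hslice, hm, hidx, hget]
          rw [hds, pvF_step s[i] (s.drop (i+1)) r hr0 m j hm' hidx']
          by_cases hj0 : j = 0
          · subst hj0
            have hnlt : ¬ s[i] < m := by simp [hlt]
            rw [hstep, if_neg hnlt]
            have hcast : ((i:Int) + 1) = ((i+1 : Nat) : Int) := by push_cast; ring
            rw [hcast]
            obtain ⟨res, i', heq, hile, hkey⟩ := ih (i+1) r (acc ++ [s[i]]) (by omega) (by omega)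
            refine ⟨res, i', heq, hile, ?_⟩
            rw [hkey, if_pos rfl]
            simp
          · have hltm : s[i] < m := hlt.mpr hj0
            rw [hstep, if_pos hltm]
            have hc1 : ((j:Int) + (i:Int)) = ((i + j : Nat) : Int) := by push_cast; ring
            have hc2 : ((r:Int) - (((j:Int) + (i:Int)) - (i:Int))) = ((r - j : Nat) : Int) := by
              push_cast [hjr]; ring
            rw [hc2, hc1]
            obtain ⟨res, i', heq, hile, hkey⟩ := ih (i+j) (r-j) acc (by omega) (by omega)
            refine ⟨res, i', heq, hile, ?_⟩
            rw [hkey, if_neg hj0]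
            have : (s[i] :: s.drop (i+1)).drop j = s.drop (i+j) := by
              rw [← hds, List.drop_drop]
            rw [this]
    · refine ⟨acc, i, ?_, hi, ?_⟩
      · rw [pvAloop]
        rw [if_neg (by omega)]
      · by_cases hr0 : r = 0
        · subst hr0; simp [pvF.eq_def]
        · have hlen : s.length ≤ i := by omega
          have : s.drop i = [] := List.drop_eq_nil_of_le hlen
          rw [this, pvF.eq_def]
          simp [hr0]

theorem pvAphase3_take (res : List Char) (t : Int) (ht : 0 ≤ t) :
    pvAphase3 res t = res.take t.toNat := by
  induction hn : res.length using Nat.strong_induction_on generalizing res with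
  | _ n ihn =>
  subst hn
  by_cases hgt : (res.length : Int) > t
  · have hne : res ≠ [] := by intro h; subst h; simp at hgt; omega
    obtain ⟨l', a, rfl⟩ := (List.eq_nil_or_concat res).resolve_left hne
    simp only [List.concat_eq_append] at hgt ihn ⊢
    rw [pvAphase3.eq_def, dif_pos hgt]
    split
    · next heq => rw [PySem.List.pop?_last] at heq; cases heq
    · next x rest heq =>
      rw [PySem.List.pop?_last] at heq
      have hx : x = a ∧ rest = l' := by simpa using heq.symm
      rw [hx.2, ihn l'.length (by simp) l' rfl]
      have hta : t.toNat ≤ l'.length := by simp at hgt; omega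
      rw [List.take_append_of_le_length hta]
  · rw [pvAphase3.eq_def, dif_neg hgt]
    have : res.length ≤ t.toNat := by omega
    exact (List.take_of_length_le this).symm

theorem pvAphase23 (s : List Char) (t : Int) (ht : 0 ≤ t) (k : Nat) :
    ∀ (i : Nat) (acc : List Char), i ≤ s.length → s.length - i = k →
    pvAphase3 (pvAphase2 s acc (i : Int) t) t = (acc ++ s.drop i).take t.toNat := by
  induction k with
  | zero =>
    intro i acc hile hk
    have hlen : s.length ≤ i := by omega
    have hnil : s.drop i = [] := List.drop_eq_nil_of_le hlen
    rw [pvAphase2.eq_def, dif_neg (by omega)]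
    rw [hnil, List.append_nil]
    exact pvAphase3_take acc t ht
  | succ k ihk =>
    intro i acc hile hk
    by_cases hcond : (i:Int) < (s.length:Int) ∧ (acc.length : Int) < t
    · have hilt : i < s.length := by exact_mod_cast hcond.1
      rw [pvAphase2.eq_def, dif_pos hcond, PySem.List.pyGet?_ofNat s i hilt]
      have hcast : ((i:Int) + 1) = ((i+1 : Nat) : Int) := by push_cast; ring
      rw [hcast, ihk (i+1) (acc ++ [s[i]]) (by omega) (by omega)]
      rw [List.drop_eq_getElem_cons hilt]
      simp only [List.append_assoc, List.singleton_append]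
    · rw [pvAphase2.eq_def, dif_neg hcond]
      rcases not_and_or.mp hcond with h | h
      · have hlen : s.length ≤ i := by omega
        rw [List.drop_eq_nil_of_le hlen, List.append_nil]
        exact pvAphase3_take acc t ht
      · have hta : t.toNat ≤ acc.length := by omega
        rw [pvAphase3_take acc t ht, List.take_append_of_le_length hta]

-- bridge from B's port (stack bottom-first, Int budget) to pvPops/pvRun
theorem pvBpops_bridge (rst : List Char) (r : Int) (c : Char) :
    pvBpops rst.reverse r c =
      ((pvPops rst r.toNat c).1.reverse,
        r - ((r.toNat : Int) - ((pvPops rst r.toNat c).2 : Int))) := by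
  induction rst generalizing r with
  | nil =>
    rw [pvBpops.eq_def]
    simp [pvPops]
  | cons p rest ih =>
    have hrev : (p :: rest).reverse = rest.reverse ++ [p] := by simp
    rw [hrev, pvBpops.eq_def]
    split
    · next heq => rw [List.getLast?_concat] at heq; cases heq
    · next top heq =>
      rw [List.getLast?_concat] at heq
      have htop : top = p := by simpa using heq.symm
      subst htop
      by_cases hcond : r > 0 ∧ top < c
      · rw [if_pos hcond, List.dropLast_concat, ih (r-1)]
        have h1 : (r - 1).toNat = r.toNat - 1 := by omega
        have h2 : 0 < r.toNat := by omega
        have hP : pvPops (top :: rest) r.toNat c = pvPops rest (r.toNat - 1) c := by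
          rw [pvPops]; rw [if_pos ⟨h2, hcond.2⟩]
        rw [hP, h1]
        simp only [Prod.mk.injEq]
        refine ⟨trivial, ?_⟩
        have hle : (pvPops rest (r.toNat - 1) c).2 ≤ r.toNat - 1 := pvPops_rem_le _ _ _
        have hr1 : r > 0 := hcond.1
        omega
      · rw [if_neg hcond]
        have hP : pvPops (top :: rest) r.toNat c = (top :: rest, r.toNat) := by
          rw [pvPops]
          rw [if_neg (fun hx => hcond ⟨by omega, hx.2⟩)]
        rw [hP]
        simp

theorem pvBfold_bridge (cs : List Char) (rst : List Char) (r : Int) :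
    List.foldl pvBstep (rst.reverse, r) cs =
      ((pvRun rst r.toNat cs).1.reverse,
        r - ((r.toNat : Int) - ((pvRun rst r.toNat cs).2 : Int))) := by
  induction cs generalizing rst r with
  | nil => simp [pvRun]
  | cons c cs ih =>
    obtain ⟨k, hk1, hk2, hk3⟩ := pvPops_spec rst r.toNat c
    have hstep : pvBstep (rst.reverse, r) c
        = ((c :: (pvPops rst r.toNat c).1).reverse, r - ((r.toNat : Int) - ((pvPops rst r.toNat c).2 : Int))) := by
      unfold pvBstep
      rw [pvBpops_bridge rst r c]
      simp
    rw [List.foldl_cons, hstep]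
    have htn : (r - ((r.toNat : Int) - ((pvPops rst r.toNat c).2 : Int))).toNat = (pvPops rst r.toNat c).2 := by
      rw [hk3]
      show (r - ((r.toNat : Int) - ((r.toNat - k : Nat) : Int))).toNat = r.toNat - k
      omega
    rw [ih (c :: (pvPops rst r.toNat c).1) _]
    rw [htn]
    have hrun : pvRun rst r.toNat (c :: cs) = pvRun (c :: (pvPops rst r.toNat c).1) (pvPops rst r.toNat c).2 cs := by
      rw [pvRun]
    rw [hrun]
    simp only [Prod.mk.injEq]
    refine ⟨trivial, ?_⟩
    omega

theorem pvA_eq_F (line : String) (t : Int) (ht : 0 ≤ t) :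
    sliding_window_greedy line t
      = String.mk ((pvF line.toList ((line.toList.length : Int) - t).toNat).take t.toNat) := by
  show String.mk (pvAphase3 (pvAphase2 line.toList
      (pvAloop line.toList [] 0 ((line.toList.length : Int) - t) (line.toList.length + 1)).1
      (pvAloop line.toList [] 0 ((line.toList.length : Int) - t) (line.toList.length + 1)).2 t) t)
    = String.mk ((pvF line.toList ((line.toList.length : Int) - t).toNat).take t.toNat)
  by_cases hr : ((line.toList.length : Int) - t) > 0
  · obtain ⟨res, i', heq, hile, hkey⟩ :=
      pvAloop_F line.toList (line.toList.length + 1) 0 (((line.toList.length : Int) - t)).toNat [] (by omega) (by omega)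
    push_cast at heq
    rw [show ((((line.toList.length : Int) - t).toNat : Int)) = (line.toList.length : Int) - t from by omega] at heq
    rw [heq]
    simp only
    rw [pvAphase23 line.toList t ht (line.toList.length - i') i' res hile rfl]
    rw [hkey]
    simp
  · have hstop : pvAloop line.toList [] 0 ((line.toList.length : Int) - t) (line.toList.length + 1)
        = ([], 0) := by
      rw [pvAloop]
      rw [if_neg (by omega)]
    rw [hstop]
    show String.mk (pvAphase3 (pvAphase2 line.toList [] 0 t) t)
      = String.mk ((pvF line.toList ((line.toList.length : Int) - t).toNat).take t.toNat)
    have h23 := pvAphase23 line.toList t ht (line.toList.length - 0) 0 [] (by omega) rfl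
    push_cast at h23
    rw [h23]
    rw [show ((line.toList.length : Int) - t).toNat = 0 from by omega]
    simp [pvF.eq_def]

theorem pvB_eq_F (line : String) (t : Int) (ht : 0 ≤ t) :
    sliding_window_greedy_alt line t
      = String.mk ((pvF line.toList ((line.toList.length : Int) - t).toNat).take t.toNat) := by
  show String.mk (PySem.List.slice
      (line.toList.foldl pvBstep ([], (line.toList.length : Int) - t)).1 none (some t))
    = String.mk ((pvF line.toList ((line.toList.length : Int) - t).toNat).take t.toNat)
  rw [show (([] : List Char), (line.toList.length : Int) - t)
      = ((([] : List Char)).reverse, (line.toList.length : Int) - t) from by simp]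
  rw [pvBfold_bridge line.toList [] ((line.toList.length : Int) - t)]
  simp only
  rw [pvRun_main line.toList.length line.toList _ le_rfl]
  rw [List.reverse_reverse]
  rw [PySem.List.slice_to _ ht]

-- ===== VERDICT (by name: the statement is the Claim_ definition above) =====
theorem sliding_window_greedy_spec : Claim_equal_sliding_window_greedy := by
  intro line t _ hpre
  unfold Spec_sliding_window_greedy
  rw [pvA_eq_F line t hpre, pvB_eq_F line t hpre]
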